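-- pv_equiv track=rewrite | github.com/mrtrkmn/orbi | utils/visualize.py | create_distribution_mapping
-- ===== SOURCE A (Python) =====
-- def create_distribution_mapping(lines):
--     mapping = {}
--     if "Inventor" not in mapping:
--         mapping["Inventor"] = 0
--     if "Unknown" not in mapping:
--         mapping["Unknown"] = 0
--     if "University" not in mapping:
--         mapping["University"] = 0
--     if "Research" not in mapping:
--         mapping["Research"] = 0
--     if "Institut" not in mapping:
--         mapping["Institut"] = 0
--     if "Others" not in mapping:
--         mapping["Others"] = 0
--
--     for i in lines:
--         if i.startswith("Inventor"):
--             mapping["Inventor"] += 1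
--         elif i.startswith("Unknown"):
--             mapping["Unknown"] += 1
--         elif "University" in i or "School" in i:
--             mapping["University"] += 1
--         elif "Research" in i or "Development" in i:
--             mapping["Research"] += 1
--         elif "Institut" in i:
--             mapping["Institut"] += 1
--         else:
--             mapping["Others"] += 1
--     return mapping
-- ===== SOURCE B (Python) =====
-- # Sieve: staged filtering passes, one per rule, over a shrinking remainder list.
-- _RULES = [
--     ("Inventor", lambda s: s.startswith("Inventor")),
--     ("Unknown", lambda s: s.startswith("Unknown")),
--     ("University", lambda s: "University" in s or "School" in s),
--     ("Research", lambda s: "Research" in s or "Development" in s),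
--     ("Institut", lambda s: "Institut" in s),
-- ]
--
-- def create_distribution_mapping(lines):
--     mapping = {}
--     remaining = list(lines)
--     for key, pred in _RULES:
--         mapping[key] = sum(1 for s in remaining if pred(s))
--         remaining = [s for s in remaining if not pred(s)]
--     mapping["Others"] = len(remaining)
--     return mapping
-- ===== Notes on version B (the rewrite author's own statement) =====
-- stated objective: alternative
-- what changed: B is a sieve: it makes one staged pass per rule over a shrinking remainder list (count the matches of that rule, keep the non-matches for later rules, leftovers are Others), instead of A's single pass that pushes each line through an elif cascade into a pre-seeded mutable dict.
import Mathlib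
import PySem

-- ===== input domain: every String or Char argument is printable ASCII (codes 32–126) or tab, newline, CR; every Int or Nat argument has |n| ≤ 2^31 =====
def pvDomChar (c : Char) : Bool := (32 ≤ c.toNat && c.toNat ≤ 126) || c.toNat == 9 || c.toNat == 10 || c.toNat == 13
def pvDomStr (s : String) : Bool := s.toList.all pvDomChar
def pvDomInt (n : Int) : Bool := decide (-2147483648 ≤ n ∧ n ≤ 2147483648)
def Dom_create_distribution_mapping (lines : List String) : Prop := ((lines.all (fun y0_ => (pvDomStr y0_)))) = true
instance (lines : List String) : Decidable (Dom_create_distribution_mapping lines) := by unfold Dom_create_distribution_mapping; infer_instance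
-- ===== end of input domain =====

-- B replaces A's single-pass elif cascade into a pre-seeded mutable dict by a sieve of staged
-- filter passes (one pass per rule over a shrinking remainder list). Objective: alternative; same asymptotic cost (not claimed faster).

-- ===== PORT A =====
def create_distribution_mapping (lines : List String) : List (String × Int) :=
  let m : PySem.Dict String Int := PySem.Dict.empty
  let m := if m.contains "Inventor" then m else m.insert "Inventor" 0
  let m := if m.contains "Unknown" then m else m.insert "Unknown" 0
  let m := if m.contains "University" then m else m.insert "University" 0
  let m := if m.contains "Research" then m else m.insert "Research" 0
  let m := if m.contains "Institut" then m else m.insert "Institut" 0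
  let m := if m.contains "Others" then m else m.insert "Others" 0
  let m := lines.foldl (fun m i =>
    if PySem.Str.startswith i "Inventor" then m.modify "Inventor" 0 (· + 1)
    else if PySem.Str.startswith i "Unknown" then m.modify "Unknown" 0 (· + 1)
    else if PySem.Str.isIn "University" i || PySem.Str.isIn "School" i then m.modify "University" 0 (· + 1)
    else if PySem.Str.isIn "Research" i || PySem.Str.isIn "Development" i then m.modify "Research" 0 (· + 1)
    else if PySem.Str.isIn "Institut" i then m.modify "Institut" 0 (· + 1)
    else m.modify "Others" 0 (· + 1)) m
  m.items

-- ===== PORT B =====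
-- the rule table of Source B (predicate lambdas named for readability)
def pvP0 (s : String) : Bool := PySem.Str.startswith s "Inventor"
def pvP1 (s : String) : Bool := PySem.Str.startswith s "Unknown"
def pvP2 (s : String) : Bool := PySem.Str.isIn "University" s || PySem.Str.isIn "School" s
def pvP3 (s : String) : Bool := PySem.Str.isIn "Research" s || PySem.Str.isIn "Development" s
def pvP4 (s : String) : Bool := PySem.Str.isIn "Institut" s

def pvRules : List (String × (String → Bool)) :=
  [("Inventor", pvP0), ("Unknown", pvP1), ("University", pvP2), ("Research", pvP3), ("Institut", pvP4)]

def create_distribution_mapping_alt (lines : List String) : List (String × Int) :=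
  let st := pvRules.foldl
    (fun (st : PySem.Dict String Int × List String) kp =>
      (st.1.insert kp.1 ((st.2.countP kp.2 : Nat) : Int), st.2.filter (fun s => !kp.2 s)))
    ((PySem.Dict.empty : PySem.Dict String Int), lines)
  (st.1.insert "Others" ((st.2.length : Nat) : Int)).items

-- ===== PRECONDITION & SPEC =====
def Spec_create_distribution_mapping (lines : List String) (out : List (String × Int)) : Prop := out = create_distribution_mapping_alt lines
instance (lines : List String) (out : List (String × Int)) : Decidable (Spec_create_distribution_mapping lines out) := by unfold Spec_create_distribution_mapping; infer_instance

-- ===== CLAIM (what is proved, stated in full; the proofs are below) =====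
def Claim_equal_create_distribution_mapping : Prop := ∀ (lines : List String), Dom_create_distribution_mapping lines → Spec_create_distribution_mapping lines (create_distribution_mapping lines)

-- ===== LEMMAS AND PROOFS =====

/-- Proof-only classifier: the category A's cascade assigns to a line. -/
def pvCategory (s : String) : Int :=
  if pvP0 s then 0 else if pvP1 s then 1 else if pvP2 s then 2
  else if pvP3 s then 3 else if pvP4 s then 4 else 5

/-- The six-key state of A's loop. -/
def pvD6 (a b c d e f : Int) : PySem.Dict String Int :=
  PySem.Dict.mk [("Inventor", a), ("Unknown", b), ("University", c),
                 ("Research", d), ("Institut", e), ("Others", f)]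

lemma pvM1 (a b c d e f : Int) : (pvD6 a b c d e f).modify "Inventor" 0 (· + 1) = pvD6 (a+1) b c d e f := by rfl
lemma pvM2 (a b c d e f : Int) : (pvD6 a b c d e f).modify "Unknown" 0 (· + 1) = pvD6 a (b+1) c d e f := by rfl
lemma pvM3 (a b c d e f : Int) : (pvD6 a b c d e f).modify "University" 0 (· + 1) = pvD6 a b (c+1) d e f := by rfl
lemma pvM4 (a b c d e f : Int) : (pvD6 a b c d e f).modify "Research" 0 (· + 1) = pvD6 a b c (d+1) e f := by rfl
lemma pvM5 (a b c d e f : Int) : (pvD6 a b c d e f).modify "Institut" 0 (· + 1) = pvD6 a b c d (e+1) f := by rfl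
lemma pvM6 (a b c d e f : Int) : (pvD6 a b c d e f).modify "Others" 0 (· + 1) = pvD6 a b c d e (f+1) := by rfl

lemma pvD6_inj {a b c d e f a' b' c' d' e' f' : Int}
    (h1 : a = a') (h2 : b = b') (h3 : c = c') (h4 : d = d') (h5 : e = e') (h6 : f = f') :
    pvD6 a b c d e f = pvD6 a' b' c' d' e' f' := by
  subst h1 h2 h3 h4 h5 h6; rfl

lemma pvFoldA (lines : List String) (a b c d e f : Int) :
    lines.foldl (fun m i =>
      if PySem.Str.startswith i "Inventor" then m.modify "Inventor" 0 (· + 1)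
      else if PySem.Str.startswith i "Unknown" then m.modify "Unknown" 0 (· + 1)
      else if PySem.Str.isIn "University" i || PySem.Str.isIn "School" i then m.modify "University" 0 (· + 1)
      else if PySem.Str.isIn "Research" i || PySem.Str.isIn "Development" i then m.modify "Research" 0 (· + 1)
      else if PySem.Str.isIn "Institut" i then m.modify "Institut" 0 (· + 1)
      else m.modify "Others" 0 (· + 1)) (pvD6 a b c d e f) =
    pvD6 (a + (lines.map pvCategory).count 0) (b + (lines.map pvCategory).count 1)
         (c + (lines.map pvCategory).count 2) (d + (lines.map pvCategory).count 3)
         (e + (lines.map pvCategory).count 4) (f + (lines.map pvCategory).count 5) := by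
  induction lines generalizing a b c d e f with
  | nil => simp
  | cons x xs ih =>
    simp only [List.foldl_cons, List.map_cons, List.count_cons]
    by_cases h0 : PySem.Str.startswith x "Inventor"
    · have hc : pvCategory x = 0 := by simp only [pvCategory, pvP0, h0]; rfl
      rw [if_pos h0, pvM1, ih, hc]
      exact pvD6_inj (by norm_num; ring) (by norm_num) (by norm_num) (by norm_num) (by norm_num) (by norm_num)
    by_cases h1 : PySem.Str.startswith x "Unknown"
    · have hc : pvCategory x = 1 := by simp only [pvCategory, pvP0, pvP1, h0, h1]; rfl
      rw [if_neg h0, if_pos h1, pvM2, ih, hc]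
      exact pvD6_inj (by norm_num) (by norm_num; ring) (by norm_num) (by norm_num) (by norm_num) (by norm_num)
    by_cases h2 : (PySem.Str.isIn "University" x || PySem.Str.isIn "School" x)
    · have hc : pvCategory x = 2 := by simp only [pvCategory, pvP0, pvP1, pvP2, h0, h1, h2]; rfl
      rw [if_neg h0, if_neg h1, if_pos h2, pvM3, ih, hc]
      exact pvD6_inj (by norm_num) (by norm_num) (by norm_num; ring) (by norm_num) (by norm_num) (by norm_num)
    by_cases h3 : (PySem.Str.isIn "Research" x || PySem.Str.isIn "Development" x)
    · have hc : pvCategory x = 3 := by simp only [pvCategory, pvP0, pvP1, pvP2, pvP3, h0, h1, h2, h3]; rfl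
      rw [if_neg h0, if_neg h1, if_neg h2, if_pos h3, pvM4, ih, hc]
      exact pvD6_inj (by norm_num) (by norm_num) (by norm_num) (by norm_num; ring) (by norm_num) (by norm_num)
    by_cases h4 : PySem.Str.isIn "Institut" x
    · have hc : pvCategory x = 4 := by simp only [pvCategory, pvP0, pvP1, pvP2, pvP3, pvP4, h0, h1, h2, h3, h4]; rfl
      rw [if_neg h0, if_neg h1, if_neg h2, if_neg h3, if_pos h4, pvM5, ih, hc]
      exact pvD6_inj (by norm_num) (by norm_num) (by norm_num) (by norm_num) (by norm_num; ring) (by norm_num)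
    · have hc : pvCategory x = 5 := by simp only [pvCategory, pvP0, pvP1, pvP2, pvP3, pvP4, h0, h1, h2, h3, h4]; rfl
      rw [if_neg h0, if_neg h1, if_neg h2, if_neg h3, if_neg h4, pvM6, ih, hc]
      exact pvD6_inj (by norm_num) (by norm_num) (by norm_num) (by norm_num) (by norm_num) (by norm_num; ring)

/-- Sieve invariant: each staged pass of B counts exactly the lines of that category
(filter chains written in `List.filter_filter`-collapsed form). -/
lemma pvSieve (lines : List String) :
    lines.countP pvP0 = (lines.map pvCategory).count 0 ∧
    (lines.filter (fun s => !pvP0 s)).countP pvP1 = (lines.map pvCategory).count 1 ∧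
    (lines.filter (fun a => !pvP1 a && !pvP0 a)).countP pvP2 = (lines.map pvCategory).count 2 ∧
    (lines.filter (fun a => !pvP2 a && (!pvP1 a && !pvP0 a))).countP pvP3 = (lines.map pvCategory).count 3 ∧
    (lines.filter (fun a => !pvP3 a && (!pvP2 a && (!pvP1 a && !pvP0 a)))).countP pvP4 = (lines.map pvCategory).count 4 ∧
    (lines.filter (fun a => !pvP4 a && (!pvP3 a && (!pvP2 a && (!pvP1 a && !pvP0 a))))).length = (lines.map pvCategory).count 5 := by
  induction lines with
  | nil => simp
  | cons x xs ih =>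
    obtain ⟨i0, i1, i2, i3, i4, i5⟩ := ih
    by_cases h0 : pvP0 x
    · have hc : pvCategory x = 0 := by simp only [pvCategory, h0]; rfl
      simp [h0, hc, i0, i1, i2, i3, i4, i5]
    by_cases h1 : pvP1 x
    · have hc : pvCategory x = 1 := by simp only [pvCategory, h0, h1]; rfl
      simp [h0, h1, hc, i0, i1, i2, i3, i4, i5]
    by_cases h2 : pvP2 x
    · have hc : pvCategory x = 2 := by simp only [pvCategory, h0, h1, h2]; rfl
      simp [h0, h1, h2, hc, i0, i1, i2, i3, i4, i5]
    by_cases h3 : pvP3 x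
    · have hc : pvCategory x = 3 := by simp only [pvCategory, h0, h1, h2, h3]; rfl
      simp [h0, h1, h2, h3, hc, i0, i1, i2, i3, i4, i5]
    by_cases h4 : pvP4 x
    · have hc : pvCategory x = 4 := by simp only [pvCategory, h0, h1, h2, h3, h4]; rfl
      simp [h0, h1, h2, h3, h4, hc, i0, i1, i2, i3, i4, i5]
    · have hc : pvCategory x = 5 := by simp only [pvCategory, h0, h1, h2, h3, h4]; rfl
      simp [h0, h1, h2, h3, h4, hc, i0, i1, i2, i3, i4, i5]

theorem create_distribution_mapping_correct (lines : List String) :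
    create_distribution_mapping lines = create_distribution_mapping_alt lines := by
  obtain ⟨s0, s1, s2, s3, s4, s5⟩ := pvSieve lines
  have hA : create_distribution_mapping lines =
      (lines.foldl (fun m i =>
        if PySem.Str.startswith i "Inventor" then m.modify "Inventor" 0 (· + 1)
        else if PySem.Str.startswith i "Unknown" then m.modify "Unknown" 0 (· + 1)
        else if PySem.Str.isIn "University" i || PySem.Str.isIn "School" i then m.modify "University" 0 (· + 1)
        else if PySem.Str.isIn "Research" i || PySem.Str.isIn "Development" i then m.modify "Research" 0 (· + 1)
        else if PySem.Str.isIn "Institut" i then m.modify "Institut" 0 (· + 1)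
        else m.modify "Others" 0 (· + 1)) (pvD6 0 0 0 0 0 0)).items := rfl
  rw [hA, pvFoldA]
  simp only [create_distribution_mapping_alt, pvRules, List.foldl_cons, List.foldl_nil,
    List.filter_filter]
  rw [s0, s1, s2, s3, s4, s5]
  simp [pvD6, PySem.Dict.items_insert, PySem.Dict.contains, PySem.Dict.empty]

-- ===== VERDICT (by name: the statement is the Claim_ definition above) =====
theorem create_distribution_mapping_spec : Claim_equal_create_distribution_mapping := by
  intro lines _
  exact create_distribution_mapping_correct lines
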